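-- pv_equiv track=rewrite | github.com/jmyshrall/Practice | Projects/project4/histograms_and_dictionaries.py | sessions_by_subject
-- ===== SOURCE A (Python) =====
-- def sessions_by_subject(study_log):
--     """
--     Find out how many study sessions each subject in the `subject_log` has.
--     The study log is kept ongoing during the semester to record the study
--     sessions associated with various subjects. Thus, a subject appears multiple
--     times in the `study_log`.
--     :param study_log: list of strings, representing subjects,
--         e.g., ['comp', 'math', 'eng', 'comp', 'math', 'comp']
--     :return: dictionary, representing how many times each subject is found in
--     the `study_log`.
--         key: str, representing a unique subject
--         values: positive integer, representing frequency of subject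
--     Example: session_by_subject(['comp, 'math', 'eng', 'comp', 'math', 'comp')
--         returns {'comp': 3, 'math': 2, 'eng': 1}
--     """
--
--     tally = {}
--     for subject in study_log:
--         if subject in tally:
--             tally[subject] += 1
--         else:
--             tally[subject] = 1
--     return tally
-- ===== SOURCE B (Python) =====
-- def sessions_by_subject(study_log):
--     # count each distinct subject (first-occurrence order) against the full list
--     return {subject: study_log.count(subject) for subject in dict.fromkeys(study_log)}
-- ===== Notes on version B (the rewrite author's own statement) =====
-- stated objective: simpler
-- what changed: Replaces A's single accumulating dict-update pass with an ordered dedup of the subjects followed by one full-list count per distinct subject.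
import Mathlib
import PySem

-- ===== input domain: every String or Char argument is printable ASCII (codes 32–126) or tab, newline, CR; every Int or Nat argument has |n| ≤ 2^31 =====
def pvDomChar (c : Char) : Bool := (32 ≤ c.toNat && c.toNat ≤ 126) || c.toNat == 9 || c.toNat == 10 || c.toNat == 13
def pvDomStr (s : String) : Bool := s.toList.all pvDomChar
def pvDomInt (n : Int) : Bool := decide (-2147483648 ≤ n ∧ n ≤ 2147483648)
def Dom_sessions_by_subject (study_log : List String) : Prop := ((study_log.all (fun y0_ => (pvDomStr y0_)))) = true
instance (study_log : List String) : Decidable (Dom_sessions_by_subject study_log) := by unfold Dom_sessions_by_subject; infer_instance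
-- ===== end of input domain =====

-- B builds the dict per distinct subject with list.count instead of A's accumulating pass; objective: simpler.

-- ===== PORT A =====
-- tally = {}; for subject in study_log: if subject in tally: tally[subject] += 1 else: tally[subject] = 1
def sessions_by_subject (study_log : List String) : List (String × Int) :=
  (study_log.foldl (fun tally subject =>
      if tally.contains subject then
        tally.insert subject (tally.getD subject 0 + 1)
      else
        tally.insert subject 1)
    PySem.Dict.empty).items

-- ===== PORT B =====
-- {subject: study_log.count(subject) for subject in dict.fromkeys(study_log)}
def sessions_by_subject_alt (study_log : List String) : List (String × Int) :=
  (PySem.List.dedup study_log).map (fun subject => (subject, (study_log.count subject : Int)))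

-- ===== PRECONDITION & SPEC =====
def Spec_sessions_by_subject (study_log : List String) (out : List (String × Int)) : Prop := out = sessions_by_subject_alt study_log
instance (study_log : List String) (out : List (String × Int)) : Decidable (Spec_sessions_by_subject study_log out) := by unfold Spec_sessions_by_subject; infer_instance

-- ===== CLAIM (what is proved, stated in full; the proofs are below) =====
def Claim_equal_sessions_by_subject : Prop := ∀ (study_log : List String), Dom_sessions_by_subject study_log → Spec_sessions_by_subject study_log (sessions_by_subject study_log)

-- ===== LEMMAS AND PROOFS =====

-- A's two-branch update is the unconditional 'insert x (getD x 0 + 1)' (the else branch has getD = 0).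
lemma sbs_step_eq (tally : PySem.Dict String Int) (subject : String) :
    (if tally.contains subject then
        tally.insert subject (tally.getD subject 0 + 1)
      else
        tally.insert subject 1)
    = tally.insert subject (tally.getD subject 0 + 1) := by
  by_cases h : tally.contains subject = true
  · simp [h]
  · simp only [Bool.not_eq_true] at h
    rw [PySem.Dict.getD_of_not_contains _ _ h]
    simp [h]

-- ===== VERDICT (by name: the statement is the Claim_ definition above) =====
theorem sessions_by_subject_spec : Claim_equal_sessions_by_subject := by
  intro study_log _
  unfold Spec_sessions_by_subject sessions_by_subject sessions_by_subject_alt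
  have hstep : (fun (tally : PySem.Dict String Int) subject =>
      if tally.contains subject then
        tally.insert subject (tally.getD subject 0 + 1)
      else
        tally.insert subject 1)
      = fun tally subject => tally.insert subject (tally.getD subject 0 + 1) := by
    funext tally subject
    exact sbs_step_eq tally subject
  rw [hstep, PySem.Dict.foldl_insert_getD_add_one_eq_counter, PySem.Dict.items_counter,
      PySem.List.dedup_eq_ofList]
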